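-- pv_equiv track=rewrite | github.com/jsgerman-oss/research | blackrim-model-advisor-paper/scripts/convergence-cdf.py | _trajectory_last_flip
-- ===== SOURCE A (Python) =====
-- def _trajectory_last_flip(tier_seq: list[int]) -> int:
--     """Dispatch index of the last tier flip — the first dispatch from
--     which the recommendation never changes for the remainder of the
--     trajectory. Returns 0 if no flip ever occurs.
--     """
--     n = len(tier_seq)
--     if n <= 1:
--         return 0
--     last = 0
--     for k in range(1, n):
--         if tier_seq[k] != tier_seq[k - 1]:
--             last = k
--     return last
-- ===== SOURCE B (Python) =====
-- def _trajectory_last_flip(tier_seq: list[int]) -> int: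
--     # Backward scan: first adjacent difference from the end is the last flip.
--     for k in range(len(tier_seq) - 1, 0, -1):
--         if tier_seq[k] != tier_seq[k - 1]:
--             return k
--     return 0
-- ===== Notes on version B (the rewrite author's own statement) =====
-- stated objective: alternative
-- what changed: Replaces the forward pass that tracks a `last` accumulator over every element with a backward adjacent-pair scan that early-exits at the first difference found from the end (no accumulator, no n<=1 special case).
import Mathlib
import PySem

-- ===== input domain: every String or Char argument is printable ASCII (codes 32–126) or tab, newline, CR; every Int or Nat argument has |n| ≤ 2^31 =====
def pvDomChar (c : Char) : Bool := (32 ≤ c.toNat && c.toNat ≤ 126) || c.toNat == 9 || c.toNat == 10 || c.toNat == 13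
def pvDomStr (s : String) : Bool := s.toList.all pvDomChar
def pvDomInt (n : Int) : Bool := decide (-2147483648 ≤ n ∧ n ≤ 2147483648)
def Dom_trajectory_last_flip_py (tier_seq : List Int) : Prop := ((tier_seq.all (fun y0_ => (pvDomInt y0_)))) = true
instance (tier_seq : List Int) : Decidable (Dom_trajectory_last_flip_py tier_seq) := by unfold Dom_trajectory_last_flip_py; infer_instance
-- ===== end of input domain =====

-- B replaces A's forward accumulator pass by a backward adjacent-pair scan with early exit; same cost, no accumulator.

-- ===== PORT A =====
def trajectory_last_flip_py (tier_seq : List Int) : Int :=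
  let n : Int := tier_seq.length
  if n ≤ 1 then 0
  else
    (PySem.List.pyRange 1 n 1).foldl
      (fun last k =>
        if PySem.List.pyGetD tier_seq k 0 ≠ PySem.List.pyGetD tier_seq (k - 1) 0 then k else last)
      0

-- ===== PORT B =====
-- backward loop 'for k in range(n-1, 0, -1): if xs[k] != xs[k-1]: return k' as structural recursion on k
def pvBackFind (tier_seq : List Int) : Nat → Int
  | 0 => 0
  | k + 1 =>
    if PySem.List.pyGetD tier_seq ((k : Int) + 1) 0 ≠ PySem.List.pyGetD tier_seq (k : Int) 0
    then (k : Int) + 1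
    else pvBackFind tier_seq k

def trajectory_last_flip_py_alt (tier_seq : List Int) : Int :=
  pvBackFind tier_seq (tier_seq.length - 1)

-- ===== PRECONDITION & SPEC =====
def Spec_trajectory_last_flip_py (tier_seq : List Int) (out : Int) : Prop := out = trajectory_last_flip_py_alt tier_seq
instance (tier_seq : List Int) (out : Int) : Decidable (Spec_trajectory_last_flip_py tier_seq out) := by unfold Spec_trajectory_last_flip_py; infer_instance

-- ===== CLAIM (what is proved, stated in full; the proofs are below) =====
def Claim_equal_trajectory_last_flip_py : Prop := ∀ (tier_seq : List Int), Dom_trajectory_last_flip_py tier_seq → Spec_trajectory_last_flip_py tier_seq (trajectory_last_flip_py tier_seq)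

-- ===== LEMMAS AND PROOFS =====

theorem pvFold_eq_backFind (xs : List Int) (m : Nat) :
    (PySem.List.pyRange 1 ((m : Int) + 1) 1).foldl
      (fun last k =>
        if PySem.List.pyGetD xs k 0 ≠ PySem.List.pyGetD xs (k - 1) 0 then k else last)
      0 = pvBackFind xs m := by
  induction m with
  | zero => simp [PySem.List.pyRange_one_eq_nil, pvBackFind]
  | succ m ih =>
    push_cast
    rw [PySem.List.pyRange_one_succ_right (by omega : (1 : Int) ≤ (m : Int) + 1),
        List.foldl_append, ih]
    simp only [List.foldl_cons, List.foldl_nil, pvBackFind]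
    have : ((m : Int) + 1) - 1 = (m : Int) := by ring
    rw [this]

-- ===== VERDICT (by name: the statement is the Claim_ definition above) =====
theorem trajectory_last_flip_py_spec : Claim_equal_trajectory_last_flip_py := by
  intro xs _
  unfold Spec_trajectory_last_flip_py trajectory_last_flip_py trajectory_last_flip_py_alt
  by_cases h : (xs.length : Int) ≤ 1
  · have hl : xs.length ≤ 1 := by exact_mod_cast h
    interval_cases hx : xs.length <;> simp_all [pvBackFind]
  · simp only [h, if_false]
    have hm : (xs.length : Int) = ((xs.length - 1 : Nat) : Int) + 1 := by
      have : 1 ≤ xs.length := by omega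
      push_cast [this]; ring
    rw [hm, pvFold_eq_backFind]
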